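-- pv_equiv track=rewrite | github.com/patateFAYOT/Projet-d-Algorithmique | Graph.py | number_of_edges
-- ===== SOURCE A (Python) =====
-- def set_of_vertices(graph):
--     """Returns the set of vertices of the graph."""
--     return set(graph.keys())
--
-- def set_of_neighbors(graph, u):
--     """Returns the set of neighbors of vertex u in the graph."""
--     return graph[u]
--
-- def are_neighbors(graph, u, v):
--     """Boolean function returning True if u and v are neighbors in the graph.
--      Returns False otherwise."""
--     return u in set_of_neighbors(graph, v) and v in set_of_neighbors(graph, u)
--
-- def number_of_edges(graph):
--     """Returns the number of edges of the graph.
--     We suppose that it is NON directed."""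
--     nb_of_edges = 0
--     set_of_vertices_treated = set()
--     for u in set_of_vertices(graph):
--         for v in set_of_neighbors(graph, u):
--             if v not in set_of_vertices_treated and are_neighbors(graph, u, v):
--                 nb_of_edges += 1
--         set_of_vertices_treated.add(u)
--     return nb_of_edges
-- ===== SOURCE B (Python) =====
-- def number_of_edges(graph):
--     """Returns the number of edges of the graph.
--     We suppose that it is NON directed."""
--     return len({(u, v) if u <= v else (v, u)
--                 for u in graph
--                 for v in graph[u]
--                 if u in graph[v] and v in graph[u]})
-- ===== Notes on version B (the rewrite author's own statement) =====
-- stated objective: simpler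
-- what changed: Instead of A's treated-vertex guard plus a running counter, B builds the set of canonically ordered mutual edge pairs in one set comprehension and returns its size; deduplication of the two directions (and of repeated listings) is done by the set itself.
-- outside the precondition, e.g. on number_of_edges({'a': ['a', 'a']}): A returns 2, B returns 1
import Mathlib
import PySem

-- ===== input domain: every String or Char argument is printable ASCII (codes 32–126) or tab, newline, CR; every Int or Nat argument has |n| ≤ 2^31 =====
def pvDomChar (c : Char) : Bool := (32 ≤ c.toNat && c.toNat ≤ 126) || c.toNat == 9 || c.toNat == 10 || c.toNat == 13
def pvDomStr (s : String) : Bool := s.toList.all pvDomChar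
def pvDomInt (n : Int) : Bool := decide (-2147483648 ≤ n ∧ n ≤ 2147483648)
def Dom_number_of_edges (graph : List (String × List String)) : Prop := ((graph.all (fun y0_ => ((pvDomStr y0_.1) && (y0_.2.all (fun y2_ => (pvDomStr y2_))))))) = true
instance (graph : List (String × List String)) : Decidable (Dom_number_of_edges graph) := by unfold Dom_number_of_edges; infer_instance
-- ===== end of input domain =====

-- B replaces A's treated-vertex guard + running counter by a set comprehension over canonically
-- ordered mutual edge pairs, returning its size (objective: simpler).

-- ===== PORT A =====
-- graph[u] raises KeyError for a non-key u; the port reads [] there — Pre_ excludes such inputs.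
-- A iterates over a Python set of vertices (hash order); under Pre_ the count is order-independent,
-- so the port consumes the PySem.Set in its stored order.
def set_of_vertices (graph : List (String × List String)) : PySem.Set String :=
  PySem.Set.ofList (PySem.Dict.ofList graph).keys

def set_of_neighbors (graph : List (String × List String)) (u : String) : List String :=
  (PySem.Dict.ofList graph).getD u []

def are_neighbors (graph : List (String × List String)) (u v : String) : Bool :=
  (set_of_neighbors graph v).contains u && (set_of_neighbors graph u).contains v

def number_of_edges (graph : List (String × List String)) : Int :=
  ((set_of_vertices graph).foldl
    (fun (st : Int × PySem.Set String) u =>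
      ((set_of_neighbors graph u).foldl
        (fun nb v => if !(st.2.contains v) && are_neighbors graph u v then nb + 1 else nb)
        st.1,
       PySem.Set.add st.2 u))
    (0, PySem.Set.empty)).1

-- ===== PORT B =====
-- '(u, v) if u <= v else (v, u)' — the canonically ordered edge pair
def edge_key (u v : String) : String × String := if u ≤ v then (u, v) else (v, u)

-- the set comprehension: nested folds over the dict keys and each neighbor list, adding edge keys
def number_of_edges_alt (graph : List (String × List String)) : Int :=
  (((PySem.Dict.ofList graph).keys.foldl
    (fun (es : PySem.Set (String × String)) u =>
      ((PySem.Dict.ofList graph).getD u []).foldl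
        (fun es v =>
          if ((PySem.Dict.ofList graph).getD v []).contains u
              && ((PySem.Dict.ofList graph).getD u []).contains v then
            PySem.Set.add es (edge_key u v)
          else es)
        es)
    PySem.Set.empty).length : Int)

-- ===== PRECONDITION & SPEC =====
-- Pre_ excludes (a) graphs with a neighbor that is not a dict key, on which A raises KeyError, and
-- (b) graphs whose neighbor lists contain duplicates, on which A's count depends on listing
-- multiplicities and Python's hash-based set iteration order (an accident of A's implementation).
def Pre_number_of_edges (graph : List (String × List String)) : Prop :=
  ∀ ns ∈ (PySem.Dict.ofList graph).values,
    ns.Nodup ∧ ∀ v ∈ ns, (PySem.Dict.ofList graph).contains v = true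
instance (graph : List (String × List String)) : Decidable (Pre_number_of_edges graph) := by
  unfold Pre_number_of_edges; infer_instance

def pvWitness_number_of_edges : (List (String × List String)) :=
  [("a", ["b", "c"]), ("b", ["a"]), ("c", ["a"])]

def Spec_number_of_edges (graph : List (String × List String)) (out : Int) : Prop := out = number_of_edges_alt graph
instance (graph : List (String × List String)) (out : Int) : Decidable (Spec_number_of_edges graph out) := by unfold Spec_number_of_edges; infer_instance

-- ===== CLAIM (what is proved, stated in full; the proofs are below) =====
def Claim_equal_number_of_edges : Prop := ∀ (graph : List (String × List String)), Dom_number_of_edges graph → Pre_number_of_edges graph → Spec_number_of_edges graph (number_of_edges graph)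

-- ===== LEMMAS AND PROOFS =====

lemma edge_key_comm (u v : String) : edge_key u v = edge_key v u := by
  unfold edge_key
  rcases le_total u v with h | h
  · rcases le_or_gt v u with h' | h'
    · simp [le_antisymm h h']
    · simp [h, not_le.mpr h']
  · rcases le_or_gt u v with h' | h'
    · simp [le_antisymm h h']
    · simp [h, not_le.mpr h']

lemma edge_key_eq_cases {a b c d : String} (h : edge_key a b = edge_key c d) :
    (a = c ∧ b = d) ∨ (a = d ∧ b = c) := by
  unfold edge_key at h
  split_ifs at h <;> simp [Prod.ext_iff] at h <;> tauto

lemma edge_key_right_inj {u v v' : String} (h : edge_key u v = edge_key u v') : v = v' := by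
  rcases edge_key_eq_cases h with ⟨_, h2⟩ | ⟨h1, h2⟩
  · exact h2
  · exact h2.trans h1

-- the inner loop over one neighbor list: A's count advances exactly when B's edge set grows
lemma inner_loop (m : String → Bool) (u : String) (t : List String) :
    ∀ (l : List String) (es : List (String × String)) (c : Int),
    l.Nodup → es.Nodup →
    (∀ v ∈ l, m v = true → (edge_key u v ∈ es ↔ v ∈ t)) →
    c = (es.length : Int) →
    (l.foldl (fun nb v => if !(t.contains v) && m v then nb + 1 else nb) c
       = (((l.foldl (fun es v => if m v then PySem.Set.add es (edge_key u v) else es) es)).length : Int))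
    ∧ (l.foldl (fun es v => if m v then PySem.Set.add es (edge_key u v) else es) es).Nodup
    ∧ (∀ e, e ∈ l.foldl (fun es v => if m v then PySem.Set.add es (edge_key u v) else es) es
          ↔ e ∈ es ∨ ∃ v ∈ l, m v = true ∧ e = edge_key u v) := by
  intro l
  induction l with
  | nil => intro es c _ hnd _ hc; refine ⟨hc, hnd, ?_⟩; simp
  | cons v0 l' ih =>
    intro es c hlnd hesnd hmem hc
    have hv0l' : v0 ∉ l' := (List.nodup_cons.mp hlnd).1
    have hl'nd : l'.Nodup := (List.nodup_cons.mp hlnd).2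
    simp only [List.foldl_cons]
    by_cases hm : m v0 = true
    · by_cases ht : v0 ∈ t
      · -- v0 already treated: A does not count, B's add is a no-op
        have hin : edge_key u v0 ∈ es := (hmem v0 (List.mem_cons_self) hm).mpr ht
        have htc : t.contains v0 = true := by simpa using ht
        rw [if_neg (by simp [ht, hm]), hm, if_pos rfl, PySem.Set.add_of_mem hin]
        obtain ⟨h1, h2, h3⟩ := ih es c hl'nd hesnd
          (fun v hv hmv => hmem v (List.mem_cons_of_mem _ hv) hmv) hc
        refine ⟨h1, h2, fun e => ?_⟩
        rw [h3 e]
        constructor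
        · rintro (he | ⟨v, hv, hmv, rfl⟩)
          · exact Or.inl he
          · exact Or.inr ⟨v, List.mem_cons_of_mem _ hv, hmv, rfl⟩
        · rintro (he | ⟨v, hv, hmv, rfl⟩)
          · exact Or.inl he
          · rcases List.mem_cons.mp hv with rfl | hv'
            · exact Or.inl hin
            · exact Or.inr ⟨v, hv', hmv, rfl⟩
      · -- v0 untreated and mutual: A counts, B appends a fresh edge key
        have hnin : edge_key u v0 ∉ es := fun h => ht ((hmem v0 (List.mem_cons_self) hm).mp h)
        have htc : t.contains v0 = false := by simpa using ht
        rw [if_pos (by simp [ht, hm]), hm, if_pos rfl, PySem.Set.add_of_not_mem hnin]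
        obtain ⟨h1, h2, h3⟩ := ih (es ++ [edge_key u v0]) (c + 1) hl'nd
          (by simp [List.nodup_append, hesnd]; exact fun a b hab h => hnin (h ▸ hab))
          (fun v hv hmv => by
            have hne : edge_key u v ≠ edge_key u v0 := fun h =>
              hv0l' (edge_key_right_inj h ▸ hv)
            simp only [List.mem_append, List.mem_singleton, hne, or_false]
            exact hmem v (List.mem_cons_of_mem _ hv) hmv)
          (by simp [hc])
        refine ⟨h1, h2, fun e => ?_⟩
        rw [h3 e]
        constructor
        · rintro (he | ⟨v, hv, hmv, rfl⟩)
          · rcases List.mem_append.mp he with he' | he'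
            · exact Or.inl he'
            · exact Or.inr ⟨v0, List.mem_cons_self, hm, List.mem_singleton.mp he'⟩
          · exact Or.inr ⟨v, List.mem_cons_of_mem _ hv, hmv, rfl⟩
        · rintro (he | ⟨v, hv, hmv, rfl⟩)
          · exact Or.inl (List.mem_append_left _ he)
          · rcases List.mem_cons.mp hv with rfl | hv'
            · exact Or.inl (List.mem_append_right _ (by simp))
            · exact Or.inr ⟨v, hv', hmv, rfl⟩
    · -- not mutual: both sides skip v0
      have hm' : m v0 = false := by simpa using hm
      rw [if_neg (by simp [hm']), hm', if_neg (by simp)]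
      obtain ⟨h1, h2, h3⟩ := ih es c hl'nd hesnd
        (fun v hv hmv => hmem v (List.mem_cons_of_mem _ hv) hmv) hc
      refine ⟨h1, h2, fun e => ?_⟩
      rw [h3 e]
      constructor
      · rintro (he | ⟨v, hv, hmv, rfl⟩)
        · exact Or.inl he
        · exact Or.inr ⟨v, List.mem_cons_of_mem _ hv, hmv, rfl⟩
      · rintro (he | ⟨v, hv, hmv, rfl⟩)
        · exact Or.inl he
        · rcases List.mem_cons.mp hv with rfl | hv'
          · exact absurd hmv (by simp [hm'])
          · exact Or.inr ⟨v, hv', hmv, rfl⟩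

-- the outer loop: invariant tying A's (count, treated) state to B's edge set
lemma outer_loop (graph : List (String × List String)) :
    ∀ (rest : List String) (t : PySem.Set String) (es : PySem.Set (String × String)) (c : Int),
    rest.Nodup →
    (∀ u ∈ rest, u ∉ t) →
    (∀ u ∈ rest, ((PySem.Dict.ofList graph).getD u []).Nodup) →
    es.Nodup →
    c = (es.length : Int) →
    (∀ e, e ∈ es ↔ ∃ x ∈ t, ∃ v ∈ (PySem.Dict.ofList graph).getD x [],
        (((PySem.Dict.ofList graph).getD v []).contains x
          && ((PySem.Dict.ofList graph).getD x []).contains v) = true ∧ e = edge_key x v) →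
    (rest.foldl
      (fun (st : Int × PySem.Set String) u =>
        (((PySem.Dict.ofList graph).getD u []).foldl
          (fun nb v => if !(st.2.contains v)
              && (((PySem.Dict.ofList graph).getD v []).contains u
                  && ((PySem.Dict.ofList graph).getD u []).contains v) then nb + 1 else nb)
          st.1,
         PySem.Set.add st.2 u))
      (c, t)).1
    = ((rest.foldl
        (fun (es : PySem.Set (String × String)) u =>
          ((PySem.Dict.ofList graph).getD u []).foldl
            (fun es v =>
              if ((PySem.Dict.ofList graph).getD v []).contains u
                  && ((PySem.Dict.ofList graph).getD u []).contains v then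
                PySem.Set.add es (edge_key u v)
              else es)
            es)
        es).length : Int) := by
  intro rest
  induction rest with
  | nil => intro t es c _ _ _ _ hc _; simpa using hc
  | cons u rest' ih =>
    intro t es c hnd hnt hnbr hesnd hc hchar
    have hurest : u ∉ rest' := (List.nodup_cons.mp hnd).1
    have hnd' : rest'.Nodup := (List.nodup_cons.mp hnd).2
    have hut : u ∉ t := hnt u List.mem_cons_self
    have hinner : ∀ v ∈ (PySem.Dict.ofList graph).getD u [],
        (((PySem.Dict.ofList graph).getD v []).contains u
          && ((PySem.Dict.ofList graph).getD u []).contains v) = true →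
        (edge_key u v ∈ es ↔ v ∈ t) := by
      intro v hv hmv
      rw [Bool.and_eq_true] at hmv
      obtain ⟨hcu, hcv⟩ := hmv
      constructor
      · intro he
        rcases (hchar _).mp he with ⟨x, hxt, v', hv', hmut', heq⟩
        rcases edge_key_eq_cases heq with ⟨h1, h2⟩ | ⟨h1, h2⟩
        · subst h1; exact absurd hxt hut
        · subst h2; exact hxt
      · intro hvt
        exact (hchar _).mpr ⟨v, hvt, u, by simpa using hcu,
          by rw [Bool.and_eq_true]; exact ⟨hcv, hcu⟩, edge_key_comm u v⟩
    obtain ⟨h1, h2, h3⟩ := inner_loop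
      (fun v => ((PySem.Dict.ofList graph).getD v []).contains u
          && ((PySem.Dict.ofList graph).getD u []).contains v) u t
      ((PySem.Dict.ofList graph).getD u []) es c
      (hnbr u List.mem_cons_self) hesnd hinner hc
    simp only [List.foldl_cons]
    exact ih (PySem.Set.add t u) _ _ hnd'
      (fun x hx hmem => by
        rcases (PySem.Set.mem_add _ _ _).mp hmem with hxt | rfl
        · exact hnt x (List.mem_cons_of_mem _ hx) hxt
        · exact hurest hx)
      (fun x hx => hnbr x (List.mem_cons_of_mem _ hx))
      h2 h1
      (fun e => by
        rw [h3 e]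
        constructor
        · rintro (he | ⟨v, hv, hmv, rfl⟩)
          · rcases (hchar e).mp he with ⟨x, hxt, v', hv', hmut', heq⟩
            exact ⟨x, (PySem.Set.mem_add _ _ _).mpr (Or.inl hxt), v', hv', hmut', heq⟩
          · exact ⟨u, (PySem.Set.mem_add _ _ _).mpr (Or.inr rfl), v, hv, hmv, rfl⟩
        · rintro ⟨x, hxmem, v', hv', hmut', rfl⟩
          rcases (PySem.Set.mem_add _ _ _).mp hxmem with hxt | rfl
          · exact Or.inl ((hchar _).mpr ⟨x, hxt, v', hv', hmut', rfl⟩)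
          · exact Or.inr ⟨v', hv', hmut', rfl⟩)

-- ===== VERDICT (by name: the statement is the Claim_ definition above) =====
theorem number_of_edges_spec : Claim_equal_number_of_edges := by
  intro graph _ hpre
  unfold Spec_number_of_edges number_of_edges number_of_edges_alt
  have hkeys : (PySem.Dict.ofList graph).keys.Nodup := PySem.Dict.nodup_keys_ofList graph
  have hnbr : ∀ u ∈ (PySem.Dict.ofList graph).keys,
      ((PySem.Dict.ofList graph).getD u []).Nodup := by
    intro u hu
    have hv : (PySem.Dict.ofList graph).getD u [] ∈ (PySem.Dict.ofList graph).values := by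
      rw [PySem.Dict.values_eq_map_keys _ hkeys []]
      exact List.mem_map.mpr ⟨u, hu, rfl⟩
    exact (hpre _ hv).1
  rw [set_of_vertices, PySem.Set.ofList_eq_self_of_nodup _ hkeys]
  exact outer_loop graph _ [] [] 0 hkeys (by simp) hnbr (by simp) (by simp) (by simp)
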